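-- pv_equiv track=rewrite | github.com/Jaeyeop-Jung/CodingTest | 삼성 Expert 아카데미/D3/1220. Magnetic.py | getDeadlock
-- ===== SOURCE A (Python) =====
-- def getDeadlock(arr):
--     flag = False
--     count = 0
--     for i in arr:
--         if i == 1:
--             flag = True
--         if flag and i == 2:
--             flag = False
--             count += 1
--     return count
-- ===== SOURCE B (Python) =====
-- def getDeadlock(arr):
--     f = [x for x in arr if x == 1 or x == 2]
--     return sum(1 for a, b in zip(f, f[1:]) if a == 1 and b == 2)
-- ===== Notes on version B (the rewrite author's own statement) =====
-- stated objective: simpler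
-- what changed: Replaces the armed-flag state machine by filtering arr down to its ones and twos and counting, via zip over the filtered list, each place where a one is immediately followed by a two.
import Mathlib
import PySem

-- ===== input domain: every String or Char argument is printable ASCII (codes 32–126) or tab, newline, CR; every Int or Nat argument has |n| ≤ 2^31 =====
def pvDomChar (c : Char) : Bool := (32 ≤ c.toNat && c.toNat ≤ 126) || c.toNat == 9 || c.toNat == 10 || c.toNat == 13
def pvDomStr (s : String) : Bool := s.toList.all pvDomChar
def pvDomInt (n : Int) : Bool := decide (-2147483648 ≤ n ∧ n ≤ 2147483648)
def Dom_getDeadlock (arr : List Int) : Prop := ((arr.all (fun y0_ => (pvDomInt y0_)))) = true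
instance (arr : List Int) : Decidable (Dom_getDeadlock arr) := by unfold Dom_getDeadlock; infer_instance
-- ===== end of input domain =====

-- B filters arr to its 1s and 2s and counts adjacent (1,2) pairs, replacing A's armed-flag state machine (objective: simpler).

-- ===== PORT A =====
def getDeadlock (arr : List Int) : Int :=
  (arr.foldl (fun (s : Bool × Int) i =>
      let flag := if i == 1 then true else s.1
      if flag && i == 2 then (false, s.2 + 1) else (flag, s.2))
    (false, 0)).2

-- ===== PORT B =====
def getDeadlock_alt (arr : List Int) : Int :=
  let f := arr.filter (fun x => x == 1 || x == 2)
  ((f.zip (f.drop 1)).countP (fun p => p.1 == 1 && p.2 == 2) : Int)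

-- ===== PRECONDITION & SPEC =====
def Spec_getDeadlock (arr : List Int) (out : Int) : Prop := out = getDeadlock_alt arr
instance (arr : List Int) (out : Int) : Decidable (Spec_getDeadlock arr out) := by unfold Spec_getDeadlock; infer_instance

-- ===== CLAIM (what is proved, stated in full; the proofs are below) =====
def Claim_equal_getDeadlock : Prop := ∀ (arr : List Int), Dom_getDeadlock arr → Spec_getDeadlock arr (getDeadlock arr)

-- ===== LEMMAS AND PROOFS =====

-- A's state transition, factored out for the proofs
def pvStep (s : Bool × Int) (i : Int) : Bool × Int :=
  let flag := if i == 1 then true else s.1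
  if flag && i == 2 then (false, s.2 + 1) else (flag, s.2)

-- count produced by A's loop from a given flag, as a recursion
def pvZ (flag : Bool) : List Int → Int
  | [] => 0
  | x :: xs =>
      let flag' := if x == 1 then true else flag
      if flag' && x == 2 then 1 + pvZ false xs else pvZ flag' xs

lemma foldl_pvStep (arr : List Int) : ∀ (flag : Bool) (c : Int),
    (arr.foldl pvStep (flag, c)).2 = c + pvZ flag arr := by
  induction arr with
  | nil => intro flag c; simp [pvZ]
  | cons x xs ih =>
      intro flag c
      simp only [List.foldl_cons, pvStep, pvZ]
      by_cases h1 : x = 1 <;> by_cases h2 : x = 2 <;>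
        simp [h1, h2, ih] <;> split <;> simp [ih] <;> ring

lemma pvZ_filter (arr : List Int) : ∀ flag,
    pvZ flag arr = pvZ flag (arr.filter (fun x => x == 1 || x == 2)) := by
  induction arr with
  | nil => intro flag; simp
  | cons x xs ih =>
      intro flag
      by_cases h1 : x = 1 <;> by_cases h2 : x = 2 <;>
        simp [pvZ, h1, h2, List.filter_cons, ih]

-- B's pair count, as a recursion on the filtered list
def pvC : List Int → Int
  | x :: y :: r => (if x == 1 && y == 2 then 1 else 0) + pvC (y :: r)
  | _ => 0

lemma countP_eq_pvC (f : List Int) :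
    ((f.zip (f.drop 1)).countP (fun p => p.1 == 1 && p.2 == 2) : Int) = pvC f := by
  match f with
  | [] => simp [pvC]
  | [x] => simp [pvC]
  | x :: y :: r =>
      have := countP_eq_pvC (y :: r)
      simp only [List.drop_one, List.tail_cons, List.zip_cons_cons, List.countP_cons, pvC]
      split <;> simp_all [List.drop_one] <;> omega

def pvHead2 (f : List Int) : Int := if f.head? = some 2 then 1 else 0

lemma pvZ_eq_pvC (f : List Int) (hf : ∀ x ∈ f, x = 1 ∨ x = 2) :
    pvZ false f = pvC f ∧ pvZ true f = pvC f + pvHead2 f := by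
  induction f with
  | nil => simp [pvZ, pvC, pvHead2]
  | cons x xs ih =>
      have hx : x = 1 ∨ x = 2 := hf x (by simp)
      have ih' := ih (fun y hy => hf y (by simp [hy]))
      rcases hx with hx | hx <;> subst hx
      · have e1 : pvZ false (1 :: xs) = pvZ true xs := by simp [pvZ]
        have e2 : pvZ true (1 :: xs) = pvZ true xs := by simp [pvZ]
        have e3 : pvC (1 :: xs) = pvHead2 xs + pvC xs := by
          cases xs with
          | nil => simp [pvC, pvHead2]
          | cons y r =>
              simp only [pvC, pvHead2, List.head?_cons]
              by_cases hy : y = 2 <;> simp [hy]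
        constructor
        · rw [e1, ih'.2, e3]; ring
        · rw [e2, ih'.2, e3]
          have : pvHead2 (1 :: xs) = 0 := by simp [pvHead2]
          rw [this]; ring
      · have e1 : pvZ false (2 :: xs) = pvZ false xs := by simp [pvZ]
        have e2 : pvZ true (2 :: xs) = 1 + pvZ false xs := by simp [pvZ]
        have e3 : pvC (2 :: xs) = pvC xs := by
          cases xs with
          | nil => simp [pvC]
          | cons y r => simp [pvC]
        constructor
        · rw [e1, ih'.1, e3]
        · rw [e2, ih'.1, e3]; simp [pvHead2]; ring

-- ===== VERDICT (by name: the statement is the Claim_ definition above) =====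
theorem getDeadlock_spec : Claim_equal_getDeadlock := by
  intro arr _
  show getDeadlock arr = getDeadlock_alt arr
  have hfilt : ∀ x ∈ arr.filter (fun x => x == 1 || x == 2), x = 1 ∨ x = 2 := by
    intro x hx
    have := List.of_mem_filter hx
    simpa using this
  calc getDeadlock arr
      = (arr.foldl pvStep (false, 0)).2 := rfl
    _ = 0 + pvZ false arr := foldl_pvStep arr false 0
    _ = pvZ false (arr.filter (fun x => x == 1 || x == 2)) := by
          rw [pvZ_filter]; ring
    _ = pvC (arr.filter (fun x => x == 1 || x == 2)) :=
          (pvZ_eq_pvC _ hfilt).1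
    _ = getDeadlock_alt arr := by
          rw [getDeadlock_alt, countP_eq_pvC]
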